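-- pv_equiv track=rewrite | github.com/dkrist/PhotoCatalog | scripts/photo_catalog.py | build_column_list
-- ===== SOURCE A (Python) =====
-- COLUMN_ORDER = [
--     'File_Name', 'File_Extension', 'File_RenameName',
--     'File_Size', 'File_SizeBytes', 'File_Date',
--     # --- v3 additions: hash, duplicate grouping, destination mapping,
--     # and per-row operation status. Slotted between File_Date and
--     # File_Concern so the expanded File_ block still groups at the
--     # left edge of the sheet.
--     'File_Hash',
--     'File_DupeGroup', 'File_DupeKeep',
--     'File_DestFolder', 'File_DestPath', 'File_Status',
--     'File_Concern', 'File_Path',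
--     'ImageWidth', 'ImageHeight',
--     'CameraMake', 'CameraModel', 'HostComputer', 'Software',
--     'LensMake', 'LensModel', 'LensSpec',
--     'DateTimeOriginal',
--     'OffsetTime', 'OffsetTimeOriginal', 'OffsetTimeDigitized',
--     'ExposureTime', 'FNumber', 'ISO',
--     'ShutterSpeed', 'Aperture', 'Brightness', 'ExposureBias',
--     'Flash', 'FocalLength_mm', 'FocalLength35mm',
--     'WhiteBalance', 'SceneCaptureType', 'SensingMethod', 'ColorSpace',
--     'CompositeImage', 'Orientation',
--     'XResolution', 'YResolution', 'SubjectLocation',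
--     'GPSLatitude', 'GPSLongitude', 'GPSAltitude_m',
--     'GPSSpeed', 'GPSImgDirection', 'GPSDateStamp',
--     'FaceCount_Detected', 'PersonNames',
-- ]
--
-- _INTERNAL_ROW_KEYS = {'_concerns'}
--
-- def build_column_list(all_rows):
--     all_keys = set()
--     for row in all_rows:
--         all_keys.update(row.keys())
--     all_keys -= _INTERNAL_ROW_KEYS
--
--     ordered = [c for c in COLUMN_ORDER if c in all_keys]
--     remaining = sorted(all_keys - set(ordered))
--     return ordered + remaining
-- ===== SOURCE B (Python) =====
-- COLUMN_ORDER = [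
--     'File_Name', 'File_Extension', 'File_RenameName',
--     'File_Size', 'File_SizeBytes', 'File_Date',
--     'File_Hash',
--     'File_DupeGroup', 'File_DupeKeep',
--     'File_DestFolder', 'File_DestPath', 'File_Status',
--     'File_Concern', 'File_Path',
--     'ImageWidth', 'ImageHeight',
--     'CameraMake', 'CameraModel', 'HostComputer', 'Software',
--     'LensMake', 'LensModel', 'LensSpec',
--     'DateTimeOriginal',
--     'OffsetTime', 'OffsetTimeOriginal', 'OffsetTimeDigitized',
--     'ExposureTime', 'FNumber', 'ISO',
--     'ShutterSpeed', 'Aperture', 'Brightness', 'ExposureBias',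
--     'Flash', 'FocalLength_mm', 'FocalLength35mm',
--     'WhiteBalance', 'SceneCaptureType', 'SensingMethod', 'ColorSpace',
--     'CompositeImage', 'Orientation',
--     'XResolution', 'YResolution', 'SubjectLocation',
--     'GPSLatitude', 'GPSLongitude', 'GPSAltitude_m',
--     'GPSSpeed', 'GPSImgDirection', 'GPSDateStamp',
--     'FaceCount_Detected', 'PersonNames',
-- ]
--
-- _INTERNAL_ROW_KEYS = {'_concerns'}
--
-- _RANK = {c: i for i, c in enumerate(COLUMN_ORDER)}
--
--
-- def build_column_list(all_rows):
--     keys = {k for row in all_rows for k in row} - _INTERNAL_ROW_KEYS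
--     sentinel = len(COLUMN_ORDER)
--     return sorted(keys, key=lambda k: (_RANK.get(k, sentinel), k))
-- ===== Notes on version B (the rewrite author's own statement) =====
-- stated objective: alternative
-- what changed: A filters COLUMN_ORDER against the key set and separately sorts the leftover keys, concatenating the two lists; B precomputes a rank index dict over COLUMN_ORDER and produces the result with a single sorted() call over the key set under the composite key (rank-or-sentinel, name).
import Mathlib
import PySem

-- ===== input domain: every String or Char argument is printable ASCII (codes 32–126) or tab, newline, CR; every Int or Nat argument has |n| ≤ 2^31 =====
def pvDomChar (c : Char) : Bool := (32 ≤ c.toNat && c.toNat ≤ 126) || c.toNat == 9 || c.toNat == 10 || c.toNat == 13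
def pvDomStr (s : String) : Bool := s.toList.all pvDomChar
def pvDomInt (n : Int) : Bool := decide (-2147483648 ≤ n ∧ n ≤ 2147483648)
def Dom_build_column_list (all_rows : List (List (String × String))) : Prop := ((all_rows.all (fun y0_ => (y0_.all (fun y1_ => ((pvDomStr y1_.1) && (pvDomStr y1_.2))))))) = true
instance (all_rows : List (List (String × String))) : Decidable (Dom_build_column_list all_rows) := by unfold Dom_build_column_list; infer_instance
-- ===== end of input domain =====

-- B replaces A's filter-then-sort-then-concatenate decomposition by ONE sort of the key set under a
-- composite (rank, name) key, rank looked up in a precomputed index dict; objective: alternative.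

def COLUMN_ORDER : List String := [
  "File_Name", "File_Extension", "File_RenameName",
  "File_Size", "File_SizeBytes", "File_Date",
  "File_Hash",
  "File_DupeGroup", "File_DupeKeep",
  "File_DestFolder", "File_DestPath", "File_Status",
  "File_Concern", "File_Path",
  "ImageWidth", "ImageHeight",
  "CameraMake", "CameraModel", "HostComputer", "Software",
  "LensMake", "LensModel", "LensSpec",
  "DateTimeOriginal",
  "OffsetTime", "OffsetTimeOriginal", "OffsetTimeDigitized",
  "ExposureTime", "FNumber", "ISO",
  "ShutterSpeed", "Aperture", "Brightness", "ExposureBias",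
  "Flash", "FocalLength_mm", "FocalLength35mm",
  "WhiteBalance", "SceneCaptureType", "SensingMethod", "ColorSpace",
  "CompositeImage", "Orientation",
  "XResolution", "YResolution", "SubjectLocation",
  "GPSLatitude", "GPSLongitude", "GPSAltitude_m",
  "GPSSpeed", "GPSImgDirection", "GPSDateStamp",
  "FaceCount_Detected", "PersonNames"]

-- ===== PORT A =====
-- row.keys() only feeds set.update, so feeding the key list (Set.update dedups, first occurrences) is exact.
def build_column_list (all_rows : List (List (String × String))) : List String :=
  let all_keys : PySem.Set String :=
    all_rows.foldl (fun s row => PySem.Set.update s (row.map Prod.fst)) PySem.Set.empty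
  let all_keys2 : PySem.Set String := PySem.Set.diff all_keys ["_concerns"]
  let ordered := COLUMN_ORDER.filter (fun c => PySem.Set.contains all_keys2 c)
  let remaining := PySem.List.sorted (PySem.Set.diff all_keys2 (PySem.Set.ofList ordered)) (fun x => x) false
  ordered ++ remaining

-- ===== PORT B =====
-- _RANK = {c: i for i, c in enumerate(COLUMN_ORDER)}
def RANK : PySem.Dict String Int :=
  PySem.Dict.ofList ((PySem.List.enumerate COLUMN_ORDER 0).map (fun p => (p.2, p.1)))

def build_column_list_alt (all_rows : List (List (String × String))) : List String :=
  let keys : PySem.Set String :=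
    PySem.Set.diff (PySem.Set.ofList (all_rows.flatMap (fun row => row.map Prod.fst))) ["_concerns"]
  let sentinel : Int := (COLUMN_ORDER.length : Int)
  PySem.List.sorted2 keys (fun k => RANK.getD k sentinel) (fun k => k) false

-- ===== PRECONDITION & SPEC =====
def Spec_build_column_list (all_rows : List (List (String × String))) (out : List String) : Prop := out = build_column_list_alt all_rows
instance (all_rows : List (List (String × String))) (out : List String) : Decidable (Spec_build_column_list all_rows out) := by unfold Spec_build_column_list; infer_instance

-- ===== CLAIM (what is proved, stated in full; the proofs are below) =====
def Claim_equal_build_column_list : Prop := ∀ (all_rows : List (List (String × String))), Dom_build_column_list all_rows → Spec_build_column_list all_rows (build_column_list all_rows)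

-- ===== LEMMAS AND PROOFS =====

def pvRank (k : String) : Int := RANK.getD k (COLUMN_ORDER.length : Int)

-- the two programs collect the same key set (as the same list)
lemma keys_foldl_eq (rows : List (List (String × String))) (s : PySem.Set String) :
    rows.foldl (fun s row => PySem.Set.update s (row.map Prod.fst)) s
      = PySem.Set.update s (rows.flatMap (fun row => row.map Prod.fst)) := by
  induction rows generalizing s with
  | nil => simp [PySem.Set.update_nil]
  | cons r rs ih => simp [List.foldl_cons, ih, PySem.Set.update_append]

set_option maxRecDepth 100000 in
lemma rank_map : COLUMN_ORDER.map pvRank = (List.range 54).map (Int.ofNat) := by decide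

set_option maxRecDepth 100000 in
lemma keys_RANK : RANK.keys = COLUMN_ORDER := by decide

set_option maxRecDepth 100000 in
lemma nodup_CO : COLUMN_ORDER.Nodup := by decide

set_option maxRecDepth 100000 in
lemma rank_lt_of_mem {a : String} (h : a ∈ COLUMN_ORDER) : pvRank a < 54 := by
  have : pvRank a ∈ COLUMN_ORDER.map pvRank := List.mem_map_of_mem h
  rw [rank_map] at this
  obtain ⟨n, hn, he⟩ := List.mem_map.mp this
  rw [← he]
  exact Int.ofNat_lt.mpr (List.mem_range.mp hn)

set_option maxRecDepth 100000 in
lemma rank_eq_of_not_mem {k : String} (h : k ∉ COLUMN_ORDER) : pvRank k = 54 := by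
  have hc : RANK.contains k = false := by
    by_contra hne
    have : RANK.contains k = true := by
      cases hcc : RANK.contains k
      · exact absurd hcc hne
      · rfl
    exact h (keys_RANK ▸ (PySem.Dict.contains_iff_mem_keys RANK k).mp this)
  have hlen : ((COLUMN_ORDER.length : Nat) : Int) = 54 := by decide
  rw [pvRank, PySem.Dict.getD_of_not_contains (d := RANK) (k := k) (d0 := ((COLUMN_ORDER.length : Nat) : Int)) hc, hlen]

set_option maxRecDepth 100000 in
lemma pairwise_rank_CO : COLUMN_ORDER.Pairwise (fun a b => pvRank a < pvRank b) := by
  have h : (COLUMN_ORDER.map pvRank).Pairwise (· < ·) := by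
    rw [rank_map]
    have h0 : (List.range 54).Pairwise (fun a b => (Int.ofNat a) < (Int.ofNat b)) :=
      (List.pairwise_lt_range).imp (fun h => Int.ofNat_lt.mpr h)
    exact (List.pairwise_map).mpr h0
  exact (List.pairwise_map).mp h

-- the key-function equality: sorted2 with (rank, id) is sorted with the lex key
set_option maxRecDepth 100000 in
lemma sorted2_eq_sorted_lex (xs : List String) :
    PySem.List.sorted2 xs (fun k => RANK.getD k (COLUMN_ORDER.length : Int)) (fun k => k) false
      = PySem.List.sorted xs (fun k => toLex (pvRank k, k)) false := by
  show List.foldl _ [] xs = List.foldl _ [] xs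
  congr 1
  funext acc x
  congr 1
  funext a b
  show (decide (pvRank a < pvRank b) || !decide (pvRank b < pvRank a) && decide (a < b))
      = decide (toLex (pvRank a, a) < toLex (pvRank b, b))
  rcases lt_trichotomy (pvRank a) (pvRank b) with h | h | h
  · simp [h, Prod.Lex.lt_iff]
  · simp [h, Prod.Lex.lt_iff]
  · simp [h, not_lt_of_gt h, Prod.Lex.lt_iff, ne_of_gt h]

set_option maxRecDepth 100000 in
theorem build_column_list_spec : Claim_equal_build_column_list := by
  intro all_rows _
  unfold Spec_build_column_list build_column_list build_column_list_alt
  simp only []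
  rw [sorted2_eq_sorted_lex]
  -- name the shared key set
  have hK : all_rows.foldl (fun s row => PySem.Set.update s (row.map Prod.fst)) PySem.Set.empty
      = PySem.Set.ofList (all_rows.flatMap (fun row => row.map Prod.fst)) := by
    rw [keys_foldl_eq]; exact PySem.Set.update_nil_left _
  rw [hK]
  set K : List String := PySem.Set.diff (PySem.Set.ofList (all_rows.flatMap (fun row => row.map Prod.fst))) ["_concerns"] with hKdef
  have hKnd : K.Nodup := PySem.Set.nodup_diff _ _ (PySem.Set.nodup_ofList _)
  set ordered : List String := COLUMN_ORDER.filter (fun c => PySem.Set.contains K c) with hord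
  set R : List String := PySem.Set.diff K (PySem.Set.ofList ordered) with hR
  set remaining : List String := PySem.List.sorted R (fun x => x) false with hrem
  have hordnd : ordered.Nodup := nodup_CO.filter _
  have hRnd : R.Nodup := PySem.Set.nodup_diff _ _ hKnd
  have hremperm : remaining.Perm R := PySem.List.sorted_perm _ _ _
  have hremnd : remaining.Nodup := hremperm.nodup_iff.mpr hRnd
  have hmemR : ∀ x, x ∈ R ↔ x ∈ K ∧ x ∉ ordered := by
    intro x
    rw [hR, PySem.Set.mem_diff, PySem.Set.mem_ofList]
  have hmemOrd : ∀ x, x ∈ ordered ↔ x ∈ COLUMN_ORDER ∧ x ∈ K := by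
    intro x
    simp [hord, List.mem_filter]
  -- ordered ++ remaining is a permutation of K
  have hperm : (ordered ++ remaining).Perm K := by
    have hnd : (ordered ++ remaining).Nodup := by
      refine List.Nodup.append hordnd hremnd ?_
      intro a ha hb
      exact ((hmemR a).mp (hremperm.mem_iff.mp hb)).2 ha
    refine (List.perm_ext_iff_of_nodup hnd hKnd).mpr ?_
    intro x
    constructor
    · intro hx
      rcases List.mem_append.mp hx with hx | hx
      · exact ((hmemOrd x).mp hx).2
      · exact ((hmemR x).mp (hremperm.mem_iff.mp hx)).1
    · intro hx
      by_cases ho : x ∈ ordered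
      · exact List.mem_append.mpr (Or.inl ho)
      · exact List.mem_append.mpr (Or.inr (hremperm.mem_iff.mpr ((hmemR x).mpr ⟨hx, ho⟩)))
  -- ordered ++ remaining is strictly increasing under the lex key
  have hlex : (ordered ++ remaining).Pairwise
      (fun a b => toLex (pvRank a, a) < toLex (pvRank b, b)) := by
    rw [List.pairwise_append]
    refine ⟨?_, ?_, ?_⟩
    · exact (pairwise_rank_CO.filter _).imp (fun h => Prod.Lex.lt_iff.mpr (Or.inl h))
    · -- remaining is strictly increasing alphabetically and all ranks are the sentinel
      have hle : remaining.Pairwise (fun a b => a ≤ b) := by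
        simpa using PySem.List.sorted_pairwise R (fun x => x)
      have hne : remaining.Pairwise (fun a b => a ≠ b) := hremnd
      have hnotCO : ∀ x ∈ remaining, x ∉ COLUMN_ORDER := by
        intro x hx hco
        have hxR := (hmemR x).mp (hremperm.mem_iff.mp hx)
        exact hxR.2 ((hmemOrd x).mpr ⟨hco, hxR.1⟩)
      have := hle.and hne
      refine List.Pairwise.imp_of_mem ?_ this
      intro a b ha hb h
      have hra : pvRank a = 54 := rank_eq_of_not_mem (hnotCO a ha)
      have hrb : pvRank b = 54 := rank_eq_of_not_mem (hnotCO b hb)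
      exact Prod.Lex.lt_iff.mpr (Or.inr ⟨hra.trans hrb.symm, lt_of_le_of_ne h.1 h.2⟩)
    · intro a ha b hb
      have hra : pvRank a < 54 := rank_lt_of_mem ((hmemOrd a).mp ha).1
      have hrb : pvRank b = 54 := by
        refine rank_eq_of_not_mem ?_
        intro hco
        have hbR := (hmemR b).mp (hremperm.mem_iff.mp hb)
        exact hbR.2 ((hmemOrd b).mpr ⟨hco, hbR.1⟩)
      exact Prod.Lex.lt_iff.mpr (Or.inl (hrb ▸ hra))
  exact (PySem.List.sorted_eq_of_perm_of_pairwise_lt K (ordered ++ remaining) _ hperm hlex).symm
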